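-- pv_equiv track=rewrite | github.com/kyzavlad/vladkuzmenko.com | video-processing-service/app/services/music/music_library.py | _get_similar_moods
-- ===== SOURCE A (Python) =====
-- from typing import Dict, Any, List, Optional, Union
--
-- def _get_similar_moods(mood: str) -> List[str]:
--     """
--     Get similar moods based on valence-arousal model.
--
--     Args:
--         mood: Target mood
--
--     Returns:
--         List of similar moods
--     """
--     # Define mood groups based on similarity
--     mood_groups = {
--         "happy": ["joyful", "upbeat", "cheerful", "excited"],
--         "sad": ["melancholic", "depressed", "gloomy", "somber"],
--         "angry": ["aggressive", "tense", "frustrated", "intense"],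
--         "relaxed": ["calm", "peaceful", "serene", "tranquil"],
--         "tender": ["romantic", "gentle", "soft", "warm"],
--         "excited": ["energetic", "lively", "animated", "thrilling"],
--         "nostalgic": ["reflective", "wistful", "reminiscent", "sentimental"],
--         "suspenseful": ["mysterious", "tense", "dramatic", "eerie"],
--         "inspiring": ["uplifting", "motivational", "empowering", "triumphant"]
--     }
--
--     # Find the group containing the mood
--     for group_mood, similar_moods in mood_groups.items():
--         if mood == group_mood or mood in similar_moods:
--             # Return all moods in the group
--             result = [group_mood] + similar_moods
--             return [m for m in result if m != mood]
--
--     # If mood not found in any group, return empty list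
--     return []
-- ===== SOURCE B (Python) =====
-- from typing import List
--
-- # Flat precomputed similarity table: each mood maps directly to its similar
-- # moods, with the original first-group-wins resolution for the duplicated
-- # moods ("tense" -> angry group, "excited" -> happy group) baked in once.
-- _SIMILAR = {
--     "happy": ["joyful", "upbeat", "cheerful", "excited"],
--     "joyful": ["happy", "upbeat", "cheerful", "excited"],
--     "upbeat": ["happy", "joyful", "cheerful", "excited"],
--     "cheerful": ["happy", "joyful", "upbeat", "excited"],
--     "excited": ["happy", "joyful", "upbeat", "cheerful"],
--     "sad": ["melancholic", "depressed", "gloomy", "somber"],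
--     "melancholic": ["sad", "depressed", "gloomy", "somber"],
--     "depressed": ["sad", "melancholic", "gloomy", "somber"],
--     "gloomy": ["sad", "melancholic", "depressed", "somber"],
--     "somber": ["sad", "melancholic", "depressed", "gloomy"],
--     "angry": ["aggressive", "tense", "frustrated", "intense"],
--     "aggressive": ["angry", "tense", "frustrated", "intense"],
--     "tense": ["angry", "aggressive", "frustrated", "intense"],
--     "frustrated": ["angry", "aggressive", "tense", "intense"],
--     "intense": ["angry", "aggressive", "tense", "frustrated"],
--     "relaxed": ["calm", "peaceful", "serene", "tranquil"],
--     "calm": ["relaxed", "peaceful", "serene", "tranquil"],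
--     "peaceful": ["relaxed", "calm", "serene", "tranquil"],
--     "serene": ["relaxed", "calm", "peaceful", "tranquil"],
--     "tranquil": ["relaxed", "calm", "peaceful", "serene"],
--     "tender": ["romantic", "gentle", "soft", "warm"],
--     "romantic": ["tender", "gentle", "soft", "warm"],
--     "gentle": ["tender", "romantic", "soft", "warm"],
--     "soft": ["tender", "romantic", "gentle", "warm"],
--     "warm": ["tender", "romantic", "gentle", "soft"],
--     "energetic": ["excited", "lively", "animated", "thrilling"],
--     "lively": ["excited", "energetic", "animated", "thrilling"],
--     "animated": ["excited", "energetic", "lively", "thrilling"],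
--     "thrilling": ["excited", "energetic", "lively", "animated"],
--     "nostalgic": ["reflective", "wistful", "reminiscent", "sentimental"],
--     "reflective": ["nostalgic", "wistful", "reminiscent", "sentimental"],
--     "wistful": ["nostalgic", "reflective", "reminiscent", "sentimental"],
--     "reminiscent": ["nostalgic", "reflective", "wistful", "sentimental"],
--     "sentimental": ["nostalgic", "reflective", "wistful", "reminiscent"],
--     "suspenseful": ["mysterious", "tense", "dramatic", "eerie"],
--     "mysterious": ["suspenseful", "tense", "dramatic", "eerie"],
--     "dramatic": ["suspenseful", "mysterious", "tense", "eerie"],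
--     "eerie": ["suspenseful", "mysterious", "tense", "dramatic"],
--     "inspiring": ["uplifting", "motivational", "empowering", "triumphant"],
--     "uplifting": ["inspiring", "motivational", "empowering", "triumphant"],
--     "motivational": ["inspiring", "uplifting", "empowering", "triumphant"],
--     "empowering": ["inspiring", "uplifting", "motivational", "triumphant"],
--     "triumphant": ["inspiring", "uplifting", "motivational", "empowering"],
-- }
--
-- def _get_similar_moods(mood: str) -> List[str]:
--     return list(_SIMILAR.get(mood, []))
-- ===== Notes on version B (the rewrite author's own statement) =====
-- stated objective: alternative
-- what changed: Replaces A's per-call group scan (key test plus membership scan plus filter per group) with a flat precomputed mood-to-similar-moods table built once at module level, so the function body is a single dictionary lookup.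
import Mathlib
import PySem

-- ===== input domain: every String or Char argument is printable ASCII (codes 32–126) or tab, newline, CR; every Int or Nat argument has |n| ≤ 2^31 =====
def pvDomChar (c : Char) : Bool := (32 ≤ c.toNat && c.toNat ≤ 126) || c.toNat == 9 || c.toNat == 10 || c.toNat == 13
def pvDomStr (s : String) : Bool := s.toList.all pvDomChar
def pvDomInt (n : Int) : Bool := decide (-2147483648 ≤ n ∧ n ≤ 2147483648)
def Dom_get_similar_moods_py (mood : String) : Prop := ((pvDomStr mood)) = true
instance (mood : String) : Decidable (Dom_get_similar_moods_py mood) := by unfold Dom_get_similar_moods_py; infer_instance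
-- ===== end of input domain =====

-- ===== PORT A =====
-- B replaces A's per-call scan over the mood groups with a flat precomputed
-- mood -> similar-moods table and a single lookup (objective: alternative).
def pvGroupsA : List (String × List String) :=
  [("happy", ["joyful", "upbeat", "cheerful", "excited"]),
   ("sad", ["melancholic", "depressed", "gloomy", "somber"]),
   ("angry", ["aggressive", "tense", "frustrated", "intense"]),
   ("relaxed", ["calm", "peaceful", "serene", "tranquil"]),
   ("tender", ["romantic", "gentle", "soft", "warm"]),
   ("excited", ["energetic", "lively", "animated", "thrilling"]),
   ("nostalgic", ["reflective", "wistful", "reminiscent", "sentimental"]),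
   ("suspenseful", ["mysterious", "tense", "dramatic", "eerie"]),
   ("inspiring", ["uplifting", "motivational", "empowering", "triumphant"])]

def pvFindGroup (mood : String) : List (String × List String) → List String
  | [] => []
  | (g, sims) :: rest =>
    if mood == g || sims.contains mood then
      ((g :: sims).filter (fun m => m != mood))
    else pvFindGroup mood rest

def get_similar_moods_py (mood : String) : List String :=
  pvFindGroup mood pvGroupsA

-- ===== PORT B =====
-- the module-level flat table _SIMILAR of Source B (dict -> association list)
def pvSimilarTable : PySem.Dict String (List String) := PySem.Dict.mk
  [   ("happy", ["joyful", "upbeat", "cheerful", "excited"]),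
   ("joyful", ["happy", "upbeat", "cheerful", "excited"]),
   ("upbeat", ["happy", "joyful", "cheerful", "excited"]),
   ("cheerful", ["happy", "joyful", "upbeat", "excited"]),
   ("excited", ["happy", "joyful", "upbeat", "cheerful"]),
   ("sad", ["melancholic", "depressed", "gloomy", "somber"]),
   ("melancholic", ["sad", "depressed", "gloomy", "somber"]),
   ("depressed", ["sad", "melancholic", "gloomy", "somber"]),
   ("gloomy", ["sad", "melancholic", "depressed", "somber"]),
   ("somber", ["sad", "melancholic", "depressed", "gloomy"]),
   ("angry", ["aggressive", "tense", "frustrated", "intense"]),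
   ("aggressive", ["angry", "tense", "frustrated", "intense"]),
   ("tense", ["angry", "aggressive", "frustrated", "intense"]),
   ("frustrated", ["angry", "aggressive", "tense", "intense"]),
   ("intense", ["angry", "aggressive", "tense", "frustrated"]),
   ("relaxed", ["calm", "peaceful", "serene", "tranquil"]),
   ("calm", ["relaxed", "peaceful", "serene", "tranquil"]),
   ("peaceful", ["relaxed", "calm", "serene", "tranquil"]),
   ("serene", ["relaxed", "calm", "peaceful", "tranquil"]),
   ("tranquil", ["relaxed", "calm", "peaceful", "serene"]),
   ("tender", ["romantic", "gentle", "soft", "warm"]),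
   ("romantic", ["tender", "gentle", "soft", "warm"]),
   ("gentle", ["tender", "romantic", "soft", "warm"]),
   ("soft", ["tender", "romantic", "gentle", "warm"]),
   ("warm", ["tender", "romantic", "gentle", "soft"]),
   ("energetic", ["excited", "lively", "animated", "thrilling"]),
   ("lively", ["excited", "energetic", "animated", "thrilling"]),
   ("animated", ["excited", "energetic", "lively", "thrilling"]),
   ("thrilling", ["excited", "energetic", "lively", "animated"]),
   ("nostalgic", ["reflective", "wistful", "reminiscent", "sentimental"]),
   ("reflective", ["nostalgic", "wistful", "reminiscent", "sentimental"]),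
   ("wistful", ["nostalgic", "reflective", "reminiscent", "sentimental"]),
   ("reminiscent", ["nostalgic", "reflective", "wistful", "sentimental"]),
   ("sentimental", ["nostalgic", "reflective", "wistful", "reminiscent"]),
   ("suspenseful", ["mysterious", "tense", "dramatic", "eerie"]),
   ("mysterious", ["suspenseful", "tense", "dramatic", "eerie"]),
   ("dramatic", ["suspenseful", "mysterious", "tense", "eerie"]),
   ("eerie", ["suspenseful", "mysterious", "tense", "dramatic"]),
   ("inspiring", ["uplifting", "motivational", "empowering", "triumphant"]),
   ("uplifting", ["inspiring", "motivational", "empowering", "triumphant"]),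
   ("motivational", ["inspiring", "uplifting", "empowering", "triumphant"]),
   ("empowering", ["inspiring", "uplifting", "motivational", "triumphant"]),
   ("triumphant", ["inspiring", "uplifting", "motivational", "empowering"])]

def get_similar_moods_py_alt (mood : String) : List String :=
  PySem.Dict.getD pvSimilarTable mood []

-- ===== PRECONDITION & SPEC =====
def Spec_get_similar_moods_py (mood : String) (out : List String) : Prop := out = get_similar_moods_py_alt mood
instance (mood : String) (out : List String) : Decidable (Spec_get_similar_moods_py mood out) := by unfold Spec_get_similar_moods_py; infer_instance

-- ===== CLAIM (what is proved, stated in full; the proofs are below) =====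
def Claim_equal_get_similar_moods_py : Prop := ∀ (mood : String), Dom_get_similar_moods_py mood → Spec_get_similar_moods_py mood (get_similar_moods_py mood)

-- ===== LEMMAS AND PROOFS =====

-- ===== VERDICT (by name: the statement is the Claim_ definition above) =====
set_option maxRecDepth 100000 in
set_option maxHeartbeats 2000000 in
theorem get_similar_moods_py_spec : Claim_equal_get_similar_moods_py := by
  intro mood _
  unfold Spec_get_similar_moods_py
  by_cases h1 : mood = "happy"
  · subst h1; decide
  by_cases h2 : mood = "joyful"
  · subst h2; decide
  by_cases h3 : mood = "upbeat"
  · subst h3; decide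
  by_cases h4 : mood = "cheerful"
  · subst h4; decide
  by_cases h5 : mood = "excited"
  · subst h5; decide
  by_cases h6 : mood = "sad"
  · subst h6; decide
  by_cases h7 : mood = "melancholic"
  · subst h7; decide
  by_cases h8 : mood = "depressed"
  · subst h8; decide
  by_cases h9 : mood = "gloomy"
  · subst h9; decide
  by_cases h10 : mood = "somber"
  · subst h10; decide
  by_cases h11 : mood = "angry"
  · subst h11; decide
  by_cases h12 : mood = "aggressive"
  · subst h12; decide
  by_cases h13 : mood = "tense"
  · subst h13; decide
  by_cases h14 : mood = "frustrated"
  · subst h14; decide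
  by_cases h15 : mood = "intense"
  · subst h15; decide
  by_cases h16 : mood = "relaxed"
  · subst h16; decide
  by_cases h17 : mood = "calm"
  · subst h17; decide
  by_cases h18 : mood = "peaceful"
  · subst h18; decide
  by_cases h19 : mood = "serene"
  · subst h19; decide
  by_cases h20 : mood = "tranquil"
  · subst h20; decide
  by_cases h21 : mood = "tender"
  · subst h21; decide
  by_cases h22 : mood = "romantic"
  · subst h22; decide
  by_cases h23 : mood = "gentle"
  · subst h23; decide
  by_cases h24 : mood = "soft"
  · subst h24; decide
  by_cases h25 : mood = "warm"
  · subst h25; decide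
  by_cases h26 : mood = "energetic"
  · subst h26; decide
  by_cases h27 : mood = "lively"
  · subst h27; decide
  by_cases h28 : mood = "animated"
  · subst h28; decide
  by_cases h29 : mood = "thrilling"
  · subst h29; decide
  by_cases h30 : mood = "nostalgic"
  · subst h30; decide
  by_cases h31 : mood = "reflective"
  · subst h31; decide
  by_cases h32 : mood = "wistful"
  · subst h32; decide
  by_cases h33 : mood = "reminiscent"
  · subst h33; decide
  by_cases h34 : mood = "sentimental"
  · subst h34; decide
  by_cases h35 : mood = "suspenseful"
  · subst h35; decide
  by_cases h36 : mood = "mysterious"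
  · subst h36; decide
  by_cases h37 : mood = "dramatic"
  · subst h37; decide
  by_cases h38 : mood = "eerie"
  · subst h38; decide
  by_cases h39 : mood = "inspiring"
  · subst h39; decide
  by_cases h40 : mood = "uplifting"
  · subst h40; decide
  by_cases h41 : mood = "motivational"
  · subst h41; decide
  by_cases h42 : mood = "empowering"
  · subst h42; decide
  by_cases h43 : mood = "triumphant"
  · subst h43; decide
  simp [get_similar_moods_py, get_similar_moods_py_alt, pvFindGroup, pvGroupsA, pvSimilarTable,
        PySem.Dict.getD, PySem.Dict.get?, beq_iff_eq,
        h1, h2, h3, h4, h5, h6, h7, h8, h9, h10, h11, h12, h13, h14, h15, h16, h17, h18, h19, h20, h21, h22, h23, h24, h25, h26, h27, h28, h29, h30, h31, h32, h33, h34, h35, h36, h37, h38, h39, h40, h41, h42, h43, Ne.symm h1, Ne.symm h2, Ne.symm h3, Ne.symm h4, Ne.symm h5, Ne.symm h6, Ne.symm h7, Ne.symm h8, Ne.symm h9, Ne.symm h10, Ne.symm h11, Ne.symm h12, Ne.symm h13, Ne.symm h14, Ne.symm h15, Ne.symm h16, Ne.symm h17, Ne.symm h18, Ne.symm h19, Ne.symm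 h20, Ne.symm h21, Ne.symm h22, Ne.symm h23, Ne.symm h24, Ne.symm h25, Ne.symm h26, Ne.symm h27, Ne.symm h28, Ne.symm h29, Ne.symm h30, Ne.symm h31, Ne.symm h32, Ne.symm h33, Ne.symm h34, Ne.symm h35, Ne.symm h36, Ne.symm h37, Ne.symm h38, Ne.symm h39, Ne.symm h40, Ne.symm h41, Ne.symm h42, Ne.symm h43]
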